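-- pv_equiv track=rewrite | github.com/macsko/concurrency-theory | lab05/main.py | fnf_action_index
-- ===== SOURCE A (Python) =====
-- def is_dependent_on_list(D, a, l, i):
--     if i >= len(l):
--         return False
--     else:
--         if (l[i], a) in D:
--             return True
--         else:
--             return is_dependent_on_list(D, a, l, i + 1)
--
-- def fnf_action_index(D, a, result, i):
--     # Jeżeli nie była zależna z żadną wcześniejszą akcją to wstawić na indeks 0
--     if i == -1:
--         return 0
--     else:
--         # Jeżeli była zależna od i-tej listy w FNF to wstawić na indeks i + 1
--         if is_dependent_on_list(D, a, result[i], 0):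
--             return i + 1
--         else:
--             return fnf_action_index(D, a, result, i - 1)
-- ===== SOURCE B (Python) =====
-- def fnf_action_index(D, a, result, i):
--     Ds = set(D)
--     while i >= 0:
--         if any((x, a) in Ds for x in result[i]):
--             return i + 1
--         i -= 1
--     return 0
-- ===== Notes on version B (the rewrite author's own statement) =====
-- stated objective: simpler
-- what changed: Replaces A's two recursions (over the level index and over a level's elements) by a single iterative while-loop with a short-circuiting any() over a set built from D once.
-- outside the precondition, e.g. on fnf_action_index({('x', 'a')}, 'a', [['x'], ['y']], -2): A returns -1, B returns 0
import Mathlib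
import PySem

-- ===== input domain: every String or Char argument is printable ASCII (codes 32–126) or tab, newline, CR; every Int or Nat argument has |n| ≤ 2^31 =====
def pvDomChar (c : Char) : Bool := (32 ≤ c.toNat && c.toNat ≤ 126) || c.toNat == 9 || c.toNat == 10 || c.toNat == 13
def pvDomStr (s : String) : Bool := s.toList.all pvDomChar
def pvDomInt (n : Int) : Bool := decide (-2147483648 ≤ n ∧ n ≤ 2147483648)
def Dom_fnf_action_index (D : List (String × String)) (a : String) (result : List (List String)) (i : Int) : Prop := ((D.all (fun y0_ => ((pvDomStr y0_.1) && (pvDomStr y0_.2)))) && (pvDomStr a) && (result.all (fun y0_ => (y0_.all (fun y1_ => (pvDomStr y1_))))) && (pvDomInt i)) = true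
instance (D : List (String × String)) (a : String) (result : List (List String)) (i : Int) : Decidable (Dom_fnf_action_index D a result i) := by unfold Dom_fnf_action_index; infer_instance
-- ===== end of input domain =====

-- ===== PORT A =====
-- B is a simpler single while-loop with any() over a prebuilt set; Pre_ restricts to -1 <= i < len(result),
-- outside which Python A raises IndexError or returns via negative-index wraparound.
-- termination lemmas for the ports (cited by name in decreasing_by)
theorem pvDecIsDep (n : Nat) (i : Int) (h : ¬ (n : Int) ≤ i) :
    ((n : Int) - (i + 1)).toNat < ((n : Int) - i).toNat := by omega

theorem pvDecFnf {α : Type} (xs : List α) (i : Int) (x : α)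
    (h : PySem.List.pyGet? xs i = some x) :
    (i - 1 + (xs.length : Int) + 1).toNat < (i + (xs.length : Int) + 1).toNat := by
  have hin : PySem.Raise.InRange xs.length i := by
    by_contra hc
    rw [← PySem.List.pyGet?_eq_none_iff] at hc
    rw [h] at hc; cases hc
  unfold PySem.Raise.InRange at hin
  omega

theorem pvDecAlt (i : Int) (h : 0 ≤ i) : (i - 1 + 1).toNat < (i + 1).toNat := by omega

def is_dependent_on_list (D : List (String × String)) (a : String) (l : List String) (i : Int) : Bool :=
  if (l.length : Int) ≤ i then
    false
  else
    match h : PySem.List.pyGet? l i with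
    | none => false  -- unreachable from the call site (i starts at 0 and stays in range)
    | some x =>
      if (x, a) ∈ D then
        true
      else
        is_dependent_on_list D a l (i + 1)
termination_by ((l.length : Int) - i).toNat
decreasing_by exact pvDecIsDep l.length i ‹_›

def fnf_action_index (D : List (String × String)) (a : String) (result : List (List String)) (i : Int) : Int :=
  if i = -1 then
    0
  else
    match h : PySem.List.pyGet? result i with
    | none => 0  -- IndexError in Python; excluded by Pre_
    | some l =>
      if is_dependent_on_list D a l 0 then
        i + 1
      else
        fnf_action_index D a result (i - 1)
termination_by (i + (result.length : Int) + 1).toNat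
decreasing_by exact pvDecFnf result i _ h

-- ===== PORT B =====
def altLoop (Ds : PySem.Set (String × String)) (a : String) (result : List (List String)) (i : Int) : Int :=
  if h : 0 ≤ i then
    match PySem.List.pyGet? result i with
    | none => 0  -- IndexError in Python; excluded by Pre_
    | some l =>
      if l.any (fun x => PySem.Set.contains Ds (x, a)) then
        i + 1
      else
        altLoop Ds a result (i - 1)
  else 0
termination_by (i + 1).toNat
decreasing_by exact pvDecAlt i h

def fnf_action_index_alt (D : List (String × String)) (a : String) (result : List (List String)) (i : Int) : Int :=
  altLoop (PySem.Set.ofList D) a result i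

-- ===== PRECONDITION & SPEC =====
-- Pre_ excludes i >= len(result), on which A raises IndexError, and i < -1, on which A either
-- raises IndexError or returns an accidental value via Python's negative-index wraparound.
def Pre_fnf_action_index (D : List (String × String)) (a : String) (result : List (List String)) (i : Int) : Prop :=
  -1 ≤ i ∧ i < (result.length : Int)
instance (D : List (String × String)) (a : String) (result : List (List String)) (i : Int) : Decidable (Pre_fnf_action_index D a result i) := by unfold Pre_fnf_action_index; infer_instance

def pvWitness_fnf_action_index : (List (String × String)) × String × List (List String) × Int :=
  ([("x", "a")], "a", [["y"], ["x"]], 1)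

-- Spec and its instance:
def Spec_fnf_action_index (D : List (String × String)) (a : String) (result : List (List String)) (i : Int) (out : Int) : Prop := out = fnf_action_index_alt D a result i
instance (D : List (String × String)) (a : String) (result : List (List String)) (i : Int) (out : Int) : Decidable (Spec_fnf_action_index D a result i out) := by unfold Spec_fnf_action_index; infer_instance

-- ===== CLAIM (what is proved, stated in full; the proofs are below) =====
def Claim_equal_fnf_action_index : Prop := ∀ (D : List (String × String)) (a : String) (result : List (List String)) (i : Int), Dom_fnf_action_index D a result i → Pre_fnf_action_index D a result i → Spec_fnf_action_index D a result i (fnf_action_index D a result i)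

-- ===== LEMMAS AND PROOFS =====
theorem isdep_eq_any (D : List (String × String)) (a : String) (l : List String) (i : Int)
    (h0 : 0 ≤ i) :
    is_dependent_on_list D a l i
      = (l.drop i.toNat).any (fun x => PySem.Set.contains (PySem.Set.ofList D) (x, a)) := by
  fun_induction is_dependent_on_list D a l i with
  | case1 i hle =>
    have : l.length ≤ i.toNat := by omega
    simp [List.drop_eq_nil_of_le this]
  | case2 i hnle h =>
    exfalso; rw [PySem.List.pyGet?_eq_none_iff] at h; unfold PySem.Raise.InRange at h; omega
  | case3 i hnle x h hmem =>
    have hx : x = l[i.toNat]'(by omega) := by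
      rw [PySem.List.pyGet?_eq_some_getElem (xs:=l) (i:=i) h0 (by omega)] at h
      exact (Option.some_inj.mp h).symm
    rw [List.drop_eq_getElem_cons (by omega : i.toNat < l.length)]
    simp [← hx, PySem.Set.contains, PySem.Set.mem_ofList, hmem]
  | case4 i hnle x h hmem ih =>
    have hx : x = l[i.toNat]'(by omega) := by
      rw [PySem.List.pyGet?_eq_some_getElem (xs:=l) (i:=i) h0 (by omega)] at h
      exact (Option.some_inj.mp h).symm
    rw [List.drop_eq_getElem_cons (by omega : i.toNat < l.length)]
    have hsucc : (i+1).toNat = i.toNat + 1 := by omega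
    simp only [List.any_cons, ih (by omega), hsucc]
    simp [← hx, PySem.Set.contains, PySem.Set.mem_ofList, hmem]

theorem main_eq (D : List (String × String)) (a : String) (result : List (List String)) (i : Int)
    (h1 : -1 ≤ i) (h2 : i < (result.length : Int)) :
    fnf_action_index D a result i = altLoop (PySem.Set.ofList D) a result i := by
  fun_induction fnf_action_index D a result i with
  | case1 =>
    rw [altLoop]; simp
  | case2 i hi h =>
    exfalso; rw [PySem.List.pyGet?_eq_none_iff] at h; unfold PySem.Raise.InRange at h; omega
  | case3 i hi l h hdep =>
    rw [altLoop, dif_pos (show (0:Int) ≤ i by omega)]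
    split
    · next heq => rw [h] at heq; cases heq
    · next l' heq =>
      rw [h] at heq
      obtain rfl : l = l' := by injection heq
      rw [isdep_eq_any D a l 0 (by omega)] at hdep
      simp only [Int.toNat_zero, List.drop_zero] at hdep
      rw [if_pos hdep]
  | case4 i hi l h hdep ih =>
    rw [altLoop, dif_pos (show (0:Int) ≤ i by omega)]
    split
    · next heq => rw [h] at heq; cases heq
    · next l' heq =>
      rw [h] at heq
      obtain rfl : l = l' := by injection heq
      rw [isdep_eq_any D a l 0 (by omega)] at hdep
      simp only [Int.toNat_zero, List.drop_zero] at hdep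
      rw [if_neg (by simpa using hdep)]
      exact ih (by omega) (by omega)

-- ===== VERDICT (by name: the statement is the Claim_ definition above) =====
theorem fnf_action_index_spec : Claim_equal_fnf_action_index := by
  intro D a result i _ hpre
  unfold Spec_fnf_action_index fnf_action_index_alt
  exact main_eq D a result i hpre.1 hpre.2
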